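-- pv_equiv track=rewrite | github.com/adenis033/BioInformatics | Project_L6/lab6_ex2.py | find_cut_positions
-- ===== SOURCE A (Python) =====
-- def revcomp(seq):
--     """Return the reverse complement of a DNA sequence."""
--     return seq.translate(str.maketrans("ACGT", "TGCA"))[::-1]
--
-- def find_cut_positions(dna, site):
--     """Find all cut positions of a site and its reverse complement in the DNA."""
--     cut_positions = set()
--     for s in [site, revcomp(site)]:
--         start = 0
--         while True:
--             pos = dna.find(s, start)
--             if pos == -1:
--                 break
--             cut_positions.add(pos)
--             start = pos + 1
--     return sorted(cut_positions)
-- ===== SOURCE B (Python) =====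
-- def revcomp(seq):
--     """Return the reverse complement of a DNA sequence."""
--     return seq.translate(str.maketrans("ACGT", "TGCA"))[::-1]
--
-- def find_cut_positions(dna, site):
--     """Find all cut positions of a site and its reverse complement in the DNA."""
--     rc = revcomp(site)
--     L = len(site)
--     return [i for i in range(len(dna) - L + 1) if dna[i:i+L] in (site, rc)]
-- ===== Notes on version B (the rewrite author's own statement) =====
-- stated objective: simpler
-- what changed: Replaces the two advancing str.find while-loops with a set accumulator and final sort by a single windowed index scan that collects matching positions already in increasing order without duplicates.
import Mathlib
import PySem

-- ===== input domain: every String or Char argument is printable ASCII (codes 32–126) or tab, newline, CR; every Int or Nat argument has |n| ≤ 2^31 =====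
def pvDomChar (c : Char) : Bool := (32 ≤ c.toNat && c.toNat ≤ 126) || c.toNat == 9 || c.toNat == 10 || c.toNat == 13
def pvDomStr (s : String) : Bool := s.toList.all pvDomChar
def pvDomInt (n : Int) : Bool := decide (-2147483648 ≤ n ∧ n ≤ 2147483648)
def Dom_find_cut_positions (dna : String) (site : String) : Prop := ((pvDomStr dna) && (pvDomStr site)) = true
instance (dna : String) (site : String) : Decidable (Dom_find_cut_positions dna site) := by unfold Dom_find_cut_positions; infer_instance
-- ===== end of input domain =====

-- B replaces A's two advancing str.find while-loops + set + sort by one windowed index scan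
-- that emits matching positions already in increasing order without duplicates (simpler).

-- ===== PORT A =====
-- str.maketrans("ACGT", "TGCA") applied to one character (translate maps listed chars, keeps others)
def pvTrans (c : Char) : Char :=
  if c = 'A' then 'T' else if c = 'C' then 'G' else if c = 'G' then 'C' else if c = 'T' then 'A' else c

-- seq.translate(str.maketrans("ACGT","TGCA"))[::-1]; [::-1] is reverse (PySem.Str.slice?_none_none_neg_one)
def revcomp (seq : String) : String :=
  String.ofList ((seq.toList.map pvTrans).reverse)

-- the inner 'while True' loop of A: dna.find(s, start); fuel (length dna + 2) only makes it total,
-- the -1 branch always exits first (proved below)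
def findLoop (dna s : String) (start : Nat) (acc : PySem.Set Int) : Nat → PySem.Set Int
  | 0 => acc
  | fuel + 1 =>
    let pos := PySem.Str.findFrom dna s (start : Int) none
    if pos = -1 then acc
    else findLoop dna s (pos.toNat + 1) (acc.add pos) fuel

def find_cut_positions (dna : String) (site : String) : List Int :=
  let cut_positions : PySem.Set Int :=
    ([site, revcomp site]).foldl (fun acc s => findLoop dna s 0 acc (dna.toList.length + 2))
      PySem.Set.empty
  PySem.List.sorted cut_positions (fun x => x) false

-- ===== PORT B =====
def find_cut_positions_alt (dna : String) (site : String) : List Int :=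
  let rc := revcomp site
  let L : Int := site.toList.length
  (PySem.List.pyRange 0 ((dna.toList.length : Int) - L + 1) 1).filter
    (fun i => (PySem.List.slice dna.toList (some i) (some (i + L)) = site.toList) ∨
              (PySem.List.slice dna.toList (some i) (some (i + L)) = rc.toList))

-- ===== PRECONDITION & SPEC =====
def Spec_find_cut_positions (dna : String) (site : String) (out : List Int) : Prop := out = find_cut_positions_alt dna site
instance (dna : String) (site : String) (out : List Int) : Decidable (Spec_find_cut_positions dna site out) := by unfold Spec_find_cut_positions; infer_instance

-- ===== CLAIM (what is proved, stated in full; the proofs are below) =====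
def Claim_equal_find_cut_positions : Prop := ∀ (dna : String) (site : String), Dom_find_cut_positions dna site → Spec_find_cut_positions dna site (find_cut_positions dna site)

-- ===== LEMMAS AND PROOFS =====

-- findFrom with a start past the length returns -1 (CPython quirk, kept by PySem)
theorem pv_findFrom_past (cs ps : List Char) (k : Nat) (hk : cs.length < k) :
    PySem.Chars.findFrom cs ps (k : Int) none = -1 := by
  simp only [PySem.Chars.findFrom]
  rw [if_neg (show ¬((k : Int) < 0) by omega)]
  rw [if_pos (show ((cs.length : Int)) < (k : Int) by exact_mod_cast hk)]

-- membership in the set produced by A's inner while-loop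
theorem pv_findLoop_mem (dna s : String) (x : Int) :
    ∀ (fuel start : Nat) (acc : PySem.Set Int),
      dna.toList.length + 1 ≤ fuel + start →
      (x ∈ findLoop dna s start acc fuel ↔
        x ∈ acc ∨ ∃ i : Nat, start ≤ i ∧ i ≤ dna.toList.length ∧
          s.toList <+: dna.toList.drop i ∧ x = (i : Int)) := by
  intro fuel
  induction fuel with
  | zero =>
    intro start acc hfs
    simp only [findLoop]
    constructor
    · exact Or.inl
    · rintro (h | ⟨i, hsi, hin, _, _⟩)
      · exact h
      · omega
  | succ fuel ih =>
    intro start acc hfs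
    simp only [findLoop, PySem.Str.findFrom_eq]
    by_cases hbig : dna.toList.length < start
    · rw [pv_findFrom_past _ _ _ hbig]
      simp only [if_pos]
      constructor
      · exact Or.inl
      · rintro (h | ⟨i, hsi, hin, _, _⟩)
        · exact h
        · omega
    · have hbig' : start ≤ dna.toList.length := by omega
      by_cases hneg : PySem.Chars.findFrom dna.toList s.toList (start : Int) none = -1
      · rw [if_pos hneg]
        rw [PySem.Chars.findFrom_natCast_eq_neg_one_iff _ _ _ hbig'] at hneg
        constructor
        · exact Or.inl
        · rintro (h | ⟨i, hsi, hin, hpre, hx⟩)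
          · exact h
          · exfalso
            apply hneg
            have hdd : dna.toList.drop i = (dna.toList.drop start).drop (i - start) := by
              rw [List.drop_drop]; congr 1; omega
            exact ((hdd ▸ hpre).isInfix).trans (List.drop_suffix _ _).isInfix
      · rw [if_neg hneg]
        obtain ⟨hge, hpre, hmin⟩ :=
          PySem.Chars.findFrom_natCast_spec dna.toList s.toList start hbig' hneg
        set pos := PySem.Chars.findFrom dna.toList s.toList (start : Int) none with hposdef
        have hpos0 : (0 : Int) ≤ pos := le_trans (by exact_mod_cast Nat.zero_le start) hge
        have hposle : pos.toNat ≤ dna.toList.length := by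
          have heq : pos = if PySem.Chars.find (dna.toList.drop start) s.toList = -1 then -1
              else (start : Int) + PySem.Chars.find (dna.toList.drop start) s.toList :=
            hposdef.trans (PySem.Chars.findFrom_natCast _ _ _ hbig')
          have hle := PySem.Chars.find_le_length (dna.toList.drop start) s.toList
          rw [List.length_drop] at hle
          by_cases h1 : PySem.Chars.find (dna.toList.drop start) s.toList = -1
          · rw [if_pos h1] at heq; exact absurd heq hneg
          · rw [if_neg h1] at heq; omega
        rw [ih (pos.toNat + 1) (acc.add pos) (by omega)]
        rw [PySem.Set.mem_add]
        constructor
        · rintro ((h | h) | ⟨i, hsi, hin, hp, hx⟩)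
          · exact Or.inl h
          · exact Or.inr ⟨pos.toNat, by omega, hposle, hpre, by omega⟩
          · exact Or.inr ⟨i, by omega, hin, hp, hx⟩
        · rintro (h | ⟨i, hsi, hin, hp, hx⟩)
          · exact Or.inl (Or.inl h)
          · rcases Nat.lt_or_ge i (pos.toNat + 1) with hlt | hge2
            · rcases Nat.lt_or_ge i pos.toNat with hlt2 | hge3
              · exact absurd hp (hmin i hsi hlt2)
              · have : i = pos.toNat := by omega
                subst this
                exact Or.inl (Or.inr (by omega))
            · exact Or.inr ⟨i, hge2, hin, hp, hx⟩

-- the set produced by A's inner while-loop has no duplicates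
theorem pv_findLoop_nodup (dna s : String) :
    ∀ (fuel start : Nat) (acc : PySem.Set Int), acc.Nodup →
      (findLoop dna s start acc fuel).Nodup := by
  intro fuel
  induction fuel with
  | zero => intro start acc h; simpa [findLoop] using h
  | succ fuel ih =>
    intro start acc h
    simp only [findLoop]
    split
    · exact h
    · exact ih _ _ (PySem.Set.nodup_add acc _ h)

-- B's window test at a nonnegative index is the prefix test
theorem pv_window_iff (cs ps : List Char) (i : Nat) :
    PySem.List.slice cs (some (i : Int)) (some ((i : Int) + (ps.length : Int))) = ps ↔
      ps <+: cs.drop i := by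
  rw [PySem.List.slice_natCast_add]
  rw [List.prefix_iff_eq_take]
  exact eq_comm

-- a prefix occurrence fits inside the string (or the pattern is empty)
theorem pv_occ_le (cs ps : List Char) (i : Nat) (h : ps <+: cs.drop i) :
    i + ps.length ≤ cs.length ∨ ps = [] := by
  have hl := h.length_le
  rw [List.length_drop] at hl
  by_cases h1 : i ≤ cs.length
  · left; omega
  · right
    replace h1 : cs.length < i := by omega
    have hnil : cs.drop i = [] := List.drop_eq_nil_of_le (Nat.le_of_lt h1)
    rw [hnil] at h
    exact List.prefix_nil.mp h

-- length of the reverse complement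
theorem pv_revcomp_length (s : String) : (revcomp s).toList.length = s.toList.length := by
  simp [revcomp]

-- ===== VERDICT (by name: the statement is the Claim_ definition above) =====
theorem find_cut_positions_spec : Claim_equal_find_cut_positions := by
  intro dna site _
  unfold Spec_find_cut_positions
  have hA : find_cut_positions dna site =
      PySem.List.sorted
        (findLoop dna (revcomp site) 0
          (findLoop dna site 0 PySem.Set.empty (dna.toList.length + 2))
          (dna.toList.length + 2)) (fun x => x) false := rfl
  set bl := find_cut_positions_alt dna site with hbl
  have hm0 : (revcomp site).toList.length = site.toList.length := pv_revcomp_length site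
  -- membership in B's list
  have hblmem : ∀ x : Int, x ∈ bl ↔
      ∃ i : Nat, i ≤ dna.toList.length ∧
        (site.toList <+: dna.toList.drop i ∨ (revcomp site).toList <+: dna.toList.drop i) ∧
        x = (i : Int) := by
    intro x
    rw [hbl]
    unfold find_cut_positions_alt
    simp only [List.mem_filter, PySem.List.mem_pyRange_one, decide_eq_true_eq]
    constructor
    · rintro ⟨⟨hx0, hxlt⟩, hq⟩
      lift x to ℕ using hx0 with i
      refine ⟨i, by omega, ?_, rfl⟩
      rcases hq with h | h
      · exact Or.inl ((pv_window_iff dna.toList site.toList i).mp h)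
      · refine Or.inr ?_
        have hw := pv_window_iff dna.toList (revcomp site).toList i
        rw [hm0] at hw
        exact hw.mp h
    · rintro ⟨i, hin, hp, rfl⟩
      have hfit : (i : Int) < (dna.toList.length : Int) - (site.toList.length : Int) + 1 := by
        rcases hp with h | h
        · rcases pv_occ_le dna.toList site.toList i h with h2 | h2
          · omega
          · have hz : site.toList.length = 0 := by rw [h2]; rfl
            omega
        · rcases pv_occ_le dna.toList (revcomp site).toList i h with h2 | h2
          · rw [hm0] at h2; omega
          · have hz : site.toList.length = 0 := by rw [← hm0, h2]; rfl
            omega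
      refine ⟨⟨by exact_mod_cast Nat.zero_le i, hfit⟩, ?_⟩
      rcases hp with h | h
      · exact Or.inl ((pv_window_iff dna.toList site.toList i).mpr h)
      · refine Or.inr ?_
        have hw := pv_window_iff dna.toList (revcomp site).toList i
        rw [hm0] at hw
        exact hw.mpr h
  -- B's list is strictly increasing, hence without duplicates
  have hblpw : bl.Pairwise (· < ·) := by
    have hpr : (PySem.List.pyRange 0
        ((dna.toList.length : Int) - (site.toList.length : Int) + 1) 1).Pairwise
        (fun a b : Int => a < b) := by
      by_cases h : (dna.toList.length : Int) - (site.toList.length : Int) + 1 ≤ 0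
      · rw [PySem.List.pyRange_one_eq_nil h]; exact List.Pairwise.nil
      · obtain ⟨k, hk⟩ : ∃ k : Nat,
            (dna.toList.length : Int) - (site.toList.length : Int) + 1 = (k : Int) :=
          ⟨((dna.toList.length : Int) - (site.toList.length : Int) + 1).toNat, by omega⟩
        rw [hk, PySem.List.pyRange_zero_natCast]
        refine List.Pairwise.map _ (fun a b h => by exact_mod_cast h) ?_
        exact List.pairwise_lt_range
    exact List.Pairwise.filter _ hpr
  have hblnd : bl.Nodup := hblpw.imp (fun h => ne_of_lt h)
  -- the set A builds
  set cut := findLoop dna (revcomp site) 0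
      (findLoop dna site 0 PySem.Set.empty (dna.toList.length + 2))
      (dna.toList.length + 2) with hcut
  have hcutmem : ∀ x : Int, x ∈ cut ↔
      ∃ i : Nat, i ≤ dna.toList.length ∧
        (site.toList <+: dna.toList.drop i ∨ (revcomp site).toList <+: dna.toList.drop i) ∧
        x = (i : Int) := by
    intro x
    rw [hcut]
    rw [pv_findLoop_mem dna (revcomp site) x (dna.toList.length + 2) 0 _ (by omega)]
    rw [pv_findLoop_mem dna site x (dna.toList.length + 2) 0 _ (by omega)]
    constructor
    · rintro ((h | ⟨i, _, hin, hp, hx⟩) | ⟨i, _, hin, hp, hx⟩)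
      · exact absurd h (by simp [PySem.Set.empty])
      · exact ⟨i, hin, Or.inl hp, hx⟩
      · exact ⟨i, hin, Or.inr hp, hx⟩
    · rintro ⟨i, hin, (hp | hp), hx⟩
      · exact Or.inl (Or.inr ⟨i, Nat.zero_le i, hin, hp, hx⟩)
      · exact Or.inr ⟨i, Nat.zero_le i, hin, hp, hx⟩
  have hcutnd : cut.Nodup := by
    rw [hcut]
    refine pv_findLoop_nodup _ _ _ _ _ (pv_findLoop_nodup _ _ _ _ _ ?_)
    simp [PySem.Set.empty]
  have hperm : bl.Perm cut := by
    rw [List.perm_ext_iff_of_nodup hblnd hcutnd]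
    intro a
    rw [hblmem a, hcutmem a]
  rw [hA]
  exact PySem.List.sorted_eq_of_perm_of_pairwise_lt cut bl (fun x => x) hperm hblpw
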